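-- pv_equiv track=rewrite | github.com/FelipeButhay/Tetris-bot | TETRIS2_bot.py | score_he
-- ===== SOURCE A (Python) =====
-- def score_he(layed):
--     lay_files = [[] for x in range(0,10)]
--     for x, y in layed:
--         lay_files[x].append(y)
--     for x in lay_files:
--         if len(x) == 0:
--             lay_files[lay_files.index(x)] = 0
--         else:
--             lay_files[lay_files.index(x)] = 20 - min(x)
--
--     return max(lay_files)
-- ===== SOURCE B (Python) =====
-- def score_he(layed):
--     best = [None] * 10
--     for x, y in layed:
--         h = 20 - y
--         best[x] = h if best[x] is None else max(best[x], h)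
--     return max(0 if b is None else b for b in best)
-- ===== Notes on version B (the rewrite author's own statement) =====
-- stated objective: simpler
-- what changed: A buckets all y's per column and then runs a second loop replacing each bucket by 20-min (via list.index on the mutated list); B makes one pass keeping a running per-column maximum of 20-y in a flat size-10 list and takes the max, eliminating the intermediate bucket lists and the second pass.
-- outside the precondition, e.g. on score_he([(10, 1)]): A raises IndexError, B raises IndexError
import Mathlib
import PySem

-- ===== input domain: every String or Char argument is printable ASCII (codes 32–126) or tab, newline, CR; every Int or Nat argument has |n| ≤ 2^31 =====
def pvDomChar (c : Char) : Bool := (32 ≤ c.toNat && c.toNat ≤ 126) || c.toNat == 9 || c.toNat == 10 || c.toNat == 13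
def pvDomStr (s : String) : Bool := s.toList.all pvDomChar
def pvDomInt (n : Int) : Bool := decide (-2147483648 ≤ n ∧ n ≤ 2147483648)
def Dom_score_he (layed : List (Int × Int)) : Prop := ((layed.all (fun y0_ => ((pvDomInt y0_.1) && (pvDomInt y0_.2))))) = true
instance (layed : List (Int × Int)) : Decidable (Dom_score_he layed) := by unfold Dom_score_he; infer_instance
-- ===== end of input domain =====

-- B fuses A's two passes (bucket the y's per column, then per-bucket min) into ONE pass
-- keeping a running per-column maximum of 20 - y; same return value on Pre_ (column index in range).

-- ===== PORT A =====
-- a cell of A's `lay_files` during the second loop: still a bucket (list) or already an int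
inductive PyCell
  | lst : List Int → PyCell
  | int : Int → PyCell
deriving DecidableEq

-- `lay_files[x].append(y)` (negative x from the end; none = IndexError, excluded by Pre_)
def scoreHeStep1 (st : List (List Int)) (p : Int × Int) : List (List Int) :=
  match PySem.List.pyGet? st p.1 with
  | some ys => PySem.List.pySetD st p.1 (ys ++ [p.2])
  | none => st

-- one iteration of `for x in lay_files:` (Python iterates by index over the mutated list)
def scoreHeStep2 (st : List PyCell) (i : Nat) : List PyCell :=
  match st[i]? with
  | some (PyCell.lst xs) =>
      if xs.length = 0 then
        match PySem.List.index? st (PyCell.lst xs) with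
        | some j => st.set j (PyCell.int 0)
        | none => st
      else
        match PySem.List.index? st (PyCell.lst xs) with
        -- min(xs): xs ≠ [] here so min? is some; the default is unreachable
        | some j => st.set j (PyCell.int (20 - (PySem.List.min? xs (fun z => z)).getD 0))
        | none => st
  | _ => st  -- an int cell: Python's len() would raise TypeError; unreachable (earlier cells only)

def score_he (layed : List (Int × Int)) : Int :=
  let st1 := layed.foldl scoreHeStep1 (List.replicate 10 ([] : List Int))
  let st2 := (List.range 10).foldl scoreHeStep2 (st1.map PyCell.lst)
  -- max(lay_files): every cell is an int by now; the .lst default is unreachable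
  let vals := st2.map (fun c => match c with | PyCell.int n => n | PyCell.lst _ => 0)
  (PySem.List.max? vals (fun z => z)).getD 0

-- ===== PORT B =====
-- `best[x] = h if best[x] is None else max(best[x], h)` (IndexError excluded by Pre_)
def scoreHeAltStep (best : List (Option Int)) (p : Int × Int) : List (Option Int) :=
  let h := 20 - p.2
  match PySem.List.pyGet? best p.1 with
  | some old => PySem.List.pySetD best p.1 (some (match old with | none => h | some m => max m h))
  | none => best

def score_he_alt (layed : List (Int × Int)) : Int :=
  let best := layed.foldl scoreHeAltStep (List.replicate 10 (none : Option Int))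
  -- max over the 10 columns (nonempty, so max? is some)
  (PySem.List.max? (best.map (fun b => b.getD 0)) (fun z => z)).getD 0

-- ===== PRECONDITION & SPEC =====
-- Pre_ excludes column indices outside [-10, 10): there Python A raises IndexError.
def Pre_score_he (layed : List (Int × Int)) : Prop := ∀ p ∈ layed, -10 ≤ p.1 ∧ p.1 < 10
instance (layed : List (Int × Int)) : Decidable (Pre_score_he layed) := by unfold Pre_score_he; infer_instance
def pvWitness_score_he : (List (Int × Int)) := [(0, 5), (-3, 22), (0, 18)]

def Spec_score_he (layed : List (Int × Int)) (out : Int) : Prop := out = score_he_alt layed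
instance (layed : List (Int × Int)) (out : Int) : Decidable (Spec_score_he layed out) := by unfold Spec_score_he; infer_instance

-- ===== CLAIM (what is proved, stated in full; the proofs are below) =====
def Claim_equal_score_he : Prop := ∀ (layed : List (Int × Int)), Dom_score_he layed → Pre_score_he layed → Spec_score_he layed (score_he layed)

-- ===== LEMMAS AND PROOFS =====

-- B's running reduction per column, as a function of A's bucket
def gcol (ys : List Int) : Option Int :=
  ys.foldl (fun acc y => some (match acc with | none => 20 - y | some m => max m (20 - y))) none

theorem pyGet?_map {α β : Type} (f : α → β) (xs : List α) (i : Int) :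
    PySem.List.pyGet? (xs.map f) i = (PySem.List.pyGet? xs i).map f := by
  simp only [PySem.List.pyGet?, List.length_map]
  cases PySem.List.pyIdx? xs.length i with
  | none => rfl
  | some k => simp

theorem pySetD_map {α β : Type} (f : α → β) (xs : List α) (i : Int) (v : α) :
    PySem.List.pySetD (xs.map f) i (f v) = (PySem.List.pySetD xs i v).map f := by
  simp only [PySem.List.pySetD, PySem.List.pySet?, List.length_map]
  cases PySem.List.pyIdx? xs.length i with
  | none => rfl
  | some k => simp [List.map_set]

theorem gcol_append (ys : List Int) (y : Int) :
    gcol (ys ++ [y]) = some (match gcol ys with | none => 20 - y | some m => max m (20 - y)) := by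
  simp [gcol, List.foldl_append]

theorem altStep_map (st : List (List Int)) (p : Int × Int) :
    scoreHeAltStep (st.map gcol) p = (scoreHeStep1 st p).map gcol := by
  simp only [scoreHeAltStep, scoreHeStep1, pyGet?_map gcol st p.1]
  cases h : PySem.List.pyGet? st p.1 with
  | none => simp
  | some ys =>
      simp only [Option.map_some]
      rw [show (some (match gcol ys with | none => 20 - p.2 | some m => max m (20 - p.2)))
            = gcol (ys ++ [p.2]) from (gcol_append ys p.2).symm]
      exact pySetD_map gcol st p.1 (ys ++ [p.2])

-- phase-1 invariant: B's state is the gcol-image of A's state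
theorem phase1_map (layed : List (Int × Int)) :
    ∀ st : List (List Int),
      layed.foldl scoreHeAltStep (st.map gcol) = (layed.foldl scoreHeStep1 st).map gcol := by
  induction layed with
  | nil => intro st; rfl
  | cons p t ih =>
      intro st
      simp only [List.foldl_cons, altStep_map]
      exact ih _

theorem step1_length (layed : List (Int × Int)) :
    ∀ st : List (List Int), (layed.foldl scoreHeStep1 st).length = st.length := by
  induction layed with
  | nil => intro st; rfl
  | cons p t ih =>
      intro st
      simp only [List.foldl_cons]
      rw [ih]
      unfold scoreHeStep1
      cases PySem.List.pyGet? st p.1 with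
      | none => rfl
      | some ys => exact PySem.List.length_pySetD st p.1 (ys ++ [p.2])

-- value A's second loop writes for a bucket, = the value B reads off
def vcol (ys : List Int) : Int :=
  if ys.length = 0 then 0 else 20 - (PySem.List.min? ys (fun z => z)).getD 0

theorem gcol_some (t : List Int) (m : Int) :
    t.foldl (fun acc y => some (match acc with | none => 20 - y | some m => max m (20 - y))) (some m)
      = some (t.foldl (fun m y => max m (20 - y)) m) := by
  induction t generalizing m with
  | nil => rfl
  | cons y t ih => simp only [List.foldl_cons]; exact ih _

theorem foldl_max_min (t : List Int) (z : Int) :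
    t.foldl (fun m y => max m (20 - y)) (20 - z) = 20 - t.foldl min z := by
  induction t generalizing z with
  | nil => rfl
  | cons y t ih =>
      simp only [List.foldl_cons]
      rw [show max (20 - z) (20 - y) = 20 - min z y by omega]
      exact ih _

theorem gcol_getD (ys : List Int) : (gcol ys).getD 0 = vcol ys := by
  cases ys with
  | nil => rfl
  | cons z t =>
      simp only [gcol, vcol, List.foldl_cons, PySem.List.min?_id_cons, List.length_cons]
      rw [gcol_some, foldl_max_min]
      simp

theorem index?_map_int_append {B : List PyCell} (A : List (List Int)) (f : List Int -> Int) (v : List Int) :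
    PySem.List.index? ((A.map (fun ys => PyCell.int (f ys))) ++ B) (PyCell.lst v)
      = (PySem.List.index? B (PyCell.lst v)).map (· + A.length) := by
  induction A with
  | nil => simp
  | cons a t ih =>
      simp only [List.map_cons, List.cons_append]
      rw [PySem.List.index?_cons_of_ne _ (by simp)]
      rw [ih]
      cases PySem.List.index? B (PyCell.lst v) with
      | none => rfl
      | some k => simp; omega

-- phase-2 invariant
theorem phase2_inv (st1 : List (List Int)) (i : Nat) (h : i ≤ st1.length) :
    (List.range i).foldl scoreHeStep2 (st1.map PyCell.lst)
      = ((st1.take i).map (fun ys => PyCell.int (vcol ys))) ++ ((st1.drop i).map PyCell.lst) := by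
  induction i with
  | zero => simp
  | succ i ih =>
      have hi : i < st1.length := by omega
      rw [List.range_succ, List.foldl_append, ih (by omega)]
      set A := (st1.take i).map (fun ys => PyCell.int (vcol ys)) with hA
      have hAlen : A.length = i := by simp [hA, List.length_take]; omega
      have hdrop : st1.drop i = st1[i] :: st1.drop (i + 1) := List.drop_eq_getElem_cons hi
      rw [hdrop]
      simp only [List.foldl_cons, List.foldl_nil, List.map_cons]
      unfold scoreHeStep2
      have hget : (A ++ PyCell.lst st1[i] :: (st1.drop (i+1)).map PyCell.lst)[i]?
          = some (PyCell.lst st1[i]) := by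
        rw [List.getElem?_append_right (by omega)]
        simp [hAlen]
      rw [hget]
      have hidx : PySem.List.index? (A ++ PyCell.lst st1[i] :: (st1.drop (i+1)).map PyCell.lst)
          (PyCell.lst st1[i]) = some i := by
        rw [hA, index?_map_int_append, PySem.List.index?_cons_self]
        simp [hA] at hAlen ⊢
        omega
      have hset : ∀ w : Int, (A ++ PyCell.lst st1[i] :: (st1.drop (i+1)).map PyCell.lst).set i (PyCell.int w)
          = A ++ PyCell.int w :: (st1.drop (i+1)).map PyCell.lst := by
        intro w
        rw [List.set_append_right _ _ (by omega)]
        simp [hAlen]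
      have htake : (st1.take (i+1)).map (fun ys => PyCell.int (vcol ys))
          = A ++ [PyCell.int (vcol st1[i])] := by
        have ht : st1.take (i+1) = st1.take i ++ [st1[i]] := by
          rw [List.take_add_one, List.getElem?_eq_getElem hi]; rfl
        rw [hA, ht, List.map_append]; rfl
      by_cases hz : st1[i].length = 0
      · simp only [if_pos hz, hidx, hset]
        rw [htake]
        have : vcol st1[i] = 0 := by simp [vcol, hz]
        rw [this]
        simp
      · simp only [if_neg hz, hidx, hset]
        rw [htake]
        have : vcol st1[i] = 20 - (PySem.List.min? st1[i] (fun z => z)).getD 0 := by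
          simp [vcol, hz]
        rw [this]
        simp

-- ===== VERDICT (by name: the statement is the Claim_ definition above) =====
theorem score_he_spec : Claim_equal_score_he := by
  intro layed _ _
  unfold Spec_score_he score_he score_he_alt
  have hrep : (List.replicate 10 (none : Option Int))
      = (List.replicate 10 ([] : List Int)).map gcol := by simp [gcol]
  rw [hrep, phase1_map]
  set st1 := layed.foldl scoreHeStep1 (List.replicate 10 ([] : List Int)) with hst1
  have hlen : st1.length = 10 := by rw [hst1, step1_length]; rfl
  have h2 := phase2_inv st1 10 (by omega)
  have ht : st1.take 10 = st1 := List.take_of_length_le (by omega)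
  have hd : st1.drop 10 = [] := List.drop_of_length_le (by omega)
  rw [ht, hd] at h2
  simp only [h2, List.map_nil, List.append_nil, List.map_map]
  congr 1
  congr 1
  apply List.map_congr_left
  intro ys _
  simp [Function.comp, gcol_getD]
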